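-- pv_equiv track=rewrite | github.com/SubarudoDuck/Bee-Trajectory | Distance_Calculation.py | length_busyb
-- ===== SOURCE A (Python) =====
-- def length_busyb(flowers, hive):
--     """Takes a list of coordinates (tuples) of the flowers and the coordinates
--     (tuple) of the bee hive, calculates the total Manhattan distance (integer),
--     returns the total distance travelled by the bee"""
--     # first the bees will start at the hive
--     location = hive
--     total = 0
--     for count in range(0, len(flowers)):
--         # use the given formula to calculate Manhattan distance
--         distance = (abs(location[0] - flowers[count][0])
--                     + abs(location[1] - flowers[count][1]))
--         # update the total distance and current location
--         total += distance
--         location = flowers[count]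
--     # include the final step back to the hive in the total
--     total += (abs(location[0] - hive[0])
--               + abs(location[1] - hive[1]))
--     return total
-- ===== SOURCE B (Python) =====
-- def length_busyb(flowers, hive):
--     # Manhattan distance separates by axis: total trip = total variation of the
--     # x-coordinate sequence plus total variation of the y-coordinate sequence,
--     # each computed by divide and conquer over index segments.
--     xs = [hive[0]] + [f[0] for f in flowers] + [hive[0]]
--     ys = [hive[1]] + [f[1] for f in flowers] + [hive[1]]
--
--     def tv(vals, lo, hi):
--         # total variation of vals[lo..hi]
--         if hi - lo < 2:
--             return abs(vals[lo] - vals[hi]) if hi - lo == 1 else 0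
--         mid = (lo + hi) // 2
--         return tv(vals, lo, mid) + tv(vals, mid, hi)
--
--     n = len(xs) - 1
--     return tv(xs, 0, n) + tv(ys, 0, n)
-- ===== Notes on version B (the rewrite author's own statement) =====
-- stated objective: alternative
-- what changed: B exploits the separability of Manhattan distance: it projects the round trip onto each axis and computes the total variation of the x- and y-coordinate sequences independently by a divide-and-conquer recursion over index segments, instead of A's single index loop threading a 2D location accumulator with a special-cased final leg.
import Mathlib
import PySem

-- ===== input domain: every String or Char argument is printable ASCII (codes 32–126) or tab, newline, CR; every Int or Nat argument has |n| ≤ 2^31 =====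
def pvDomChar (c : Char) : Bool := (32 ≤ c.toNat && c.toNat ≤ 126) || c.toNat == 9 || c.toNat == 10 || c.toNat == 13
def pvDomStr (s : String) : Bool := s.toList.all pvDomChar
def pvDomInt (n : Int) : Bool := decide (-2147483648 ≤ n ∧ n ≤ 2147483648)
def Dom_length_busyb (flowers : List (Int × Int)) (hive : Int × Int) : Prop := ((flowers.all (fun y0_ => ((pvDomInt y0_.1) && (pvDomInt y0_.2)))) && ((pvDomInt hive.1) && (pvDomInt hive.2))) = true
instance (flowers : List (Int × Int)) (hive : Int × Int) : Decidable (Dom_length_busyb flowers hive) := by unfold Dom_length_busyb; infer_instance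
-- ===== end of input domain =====

-- B splits the Manhattan round trip by axis (it is separable) and computes the total
-- variation of each projected coordinate sequence by divide and conquer (objective: alternative).

-- ===== PORT A =====
-- index loop over range(0, len(flowers)) with state (location, total), then final leg back to hive
def length_busyb (flowers : List (Int × Int)) (hive : Int × Int) : Int :=
  let st := (PySem.List.pyRange 0 flowers.length 1).foldl
    (fun (s : (Int × Int) × Int) count =>
      let f := PySem.List.pyGetD flowers count (0, 0)
      let distance := |s.1.1 - f.1| + |s.1.2 - f.2|
      (f, s.2 + distance))
    (hive, 0)
  st.2 + (|st.1.1 - hive.1| + |st.1.2 - hive.2|)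

-- ===== PORT B =====
-- Source B's tv helper: total variation of vals[lo..hi] by divide and conquer on the index
-- segment; structural recursion on a fuel bounding the segment size (totality guard only)
def pvTvGo (fuel : Nat) (vals : List Int) (lo hi : Int) : Int :=
  match fuel with
  | 0 => 0
  | fuel + 1 =>
    if hi - lo < 2 then
      (if hi - lo = 1 then |PySem.List.pyGetD vals lo 0 - PySem.List.pyGetD vals hi 0| else 0)
    else
      pvTvGo fuel vals lo (PySem.Int.floordiv (lo + hi) 2)
        + pvTvGo fuel vals (PySem.Int.floordiv (lo + hi) 2) hi

def pvTvDC (vals : List Int) (lo hi : Int) : Int :=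
  pvTvGo ((hi - lo).toNat + 1) vals lo hi

def length_busyb_alt (flowers : List (Int × Int)) (hive : Int × Int) : Int :=
  let xs := hive.1 :: (flowers.map Prod.fst ++ [hive.1])
  let ys := hive.2 :: (flowers.map Prod.snd ++ [hive.2])
  let n : Int := (xs.length : Int) - 1
  pvTvDC xs 0 n + pvTvDC ys 0 n

-- ===== PRECONDITION & SPEC =====
def Spec_length_busyb (flowers : List (Int × Int)) (hive : Int × Int) (out : Int) : Prop := out = length_busyb_alt flowers hive
instance (flowers : List (Int × Int)) (hive : Int × Int) (out : Int) : Decidable (Spec_length_busyb flowers hive out) := by unfold Spec_length_busyb; infer_instance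

-- ===== CLAIM (what is proved, stated in full; the proofs are below) =====
def Claim_equal_length_busyb : Prop := ∀ (flowers : List (Int × Int)) (hive : Int × Int), Dom_length_busyb flowers hive → Spec_length_busyb flowers hive (length_busyb flowers hive)

-- ===== LEMMAS AND PROOFS =====

-- A's loop step
def pvStep (s : (Int × Int) × Int) (f : Int × Int) : (Int × Int) × Int :=
  (f, s.2 + (|s.1.1 - f.1| + |s.1.2 - f.2|))

-- left-to-right total variation of a scalar list (proof-side bridge between the two ports)
def pvTv : List Int → Int
  | a :: b :: rest => |a - b| + pvTv (b :: rest)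
  | _ => 0

-- left-to-right total variation of the index segment [lo, hi]
def pvSeg (vals : List Int) (lo hi : Int) : Int :=
  if lo < hi then |PySem.List.pyGetD vals lo 0 - PySem.List.pyGetD vals (lo + 1) 0| + pvSeg vals (lo + 1) hi
  else 0
termination_by (hi - lo).toNat
decreasing_by omega

theorem pvSeg_pos (vals : List Int) (lo hi : Int) (h : lo < hi) :
    pvSeg vals lo hi
      = |PySem.List.pyGetD vals lo 0 - PySem.List.pyGetD vals (lo + 1) 0| + pvSeg vals (lo + 1) hi := by
  rw [pvSeg]; simp [h]

theorem pvSeg_nonpos (vals : List Int) (lo hi : Int) (h : ¬ lo < hi) : pvSeg vals lo hi = 0 := by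
  rw [pvSeg]; simp [h]

-- segment total variation is additive at any interior split point
theorem pvSeg_split (vals : List Int) :
    ∀ (k : Nat) (lo mid hi : Int), (mid - lo).toNat = k → lo ≤ mid → mid ≤ hi →
      pvSeg vals lo hi = pvSeg vals lo mid + pvSeg vals mid hi := by
  intro k
  induction k with
  | zero =>
      intro lo mid hi hk h1 h2
      have : lo = mid := by omega
      subst this
      rw [pvSeg_nonpos vals lo lo (by omega)]
      ring
  | succ k ih =>
      intro lo mid hi hk h1 h2
      have hlm : lo < mid := by omega
      rw [pvSeg_pos vals lo hi (by omega), pvSeg_pos vals lo mid hlm,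
        ih (lo + 1) mid hi (by omega) (by omega) h2]
      ring

-- the divide-and-conquer recursion computes the left-to-right segment total variation
theorem pvTvGo_eq_pvSeg (vals : List Int) :
    ∀ (fuel : Nat) (lo hi : Int), (hi - lo).toNat < fuel → lo ≤ hi →
      pvTvGo fuel vals lo hi = pvSeg vals lo hi := by
  intro fuel
  induction fuel with
  | zero => intro lo hi hf; omega
  | succ fuel ih =>
      intro lo hi hf hle
      rw [pvTvGo]
      by_cases h2 : hi - lo < 2
      · simp only [h2, if_true]
        by_cases h1 : hi - lo = 1
        · have hhi : hi = lo + 1 := by omega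
          subst hhi
          rw [pvSeg_pos vals lo (lo + 1) (by omega), pvSeg_nonpos vals (lo + 1) (lo + 1) (by omega)]
          simp [h1]
        · rw [pvSeg_nonpos vals lo hi (by omega)]
          simp [h1]
      · simp only [h2, if_false]
        have hmid : lo + 1 ≤ PySem.Int.floordiv (lo + hi) 2 ∧ PySem.Int.floordiv (lo + hi) 2 + 1 ≤ hi := by
          rw [PySem.Int.floordiv_eq_ediv_of_pos (by norm_num)]; omega
        set mid := PySem.Int.floordiv (lo + hi) 2 with hm
        rw [ih lo mid (by omega) (by omega), ih mid hi (by omega) (by omega)]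
        exact (pvSeg_split vals (mid - lo).toNat lo mid hi rfl (by omega) (by omega)).symm

theorem pvTvDC_eq_pvSeg (vals : List Int) (lo hi : Int) (hle : lo ≤ hi) :
    pvTvDC vals lo hi = pvSeg vals lo hi :=
  pvTvGo_eq_pvSeg vals ((hi - lo).toNat + 1) lo hi (by omega) hle

theorem pvTv_short (l : List Int) (h : l.length ≤ 1) : pvTv l = 0 := by
  match l with
  | [] => rfl
  | [a] => rfl
  | a :: b :: rest => simp at h

-- the segment total variation from index k to the end is pvTv of the dropped list
theorem pvSeg_drop (vals : List Int) :
    ∀ (m k : Nat), vals.length - k = m → k < vals.length →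
      pvSeg vals (k : Int) ((vals.length : Int) - 1) = pvTv (vals.drop k) := by
  intro m
  induction m with
  | zero => intro k hm hk; omega
  | succ m ih =>
      intro k hm hk
      by_cases hlast : k + 1 < vals.length
      · have hget : vals.drop k = vals[k] :: vals.drop (k + 1) := List.drop_eq_getElem_cons hk
        have hget1 : vals.drop (k + 1) = vals[k + 1] :: vals.drop (k + 2) := List.drop_eq_getElem_cons hlast
        rw [pvSeg_pos vals (k : Int) ((vals.length : Int) - 1) (by omega)]
        have e0 : PySem.List.pyGetD vals (k : Int) 0 = vals[k] := by
          simp [PySem.List.pyGetD_natCast, List.getD_eq_getElem?_getD, hk]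
        have e1 : PySem.List.pyGetD vals ((k : Int) + 1) 0 = vals[k + 1] := by
          have hc' : ((k : Int) + 1) = ((k + 1 : Nat) : Int) := by push_cast; ring
          rw [hc', PySem.List.pyGetD_natCast]
          simp [List.getD_eq_getElem?_getD, hlast]
        rw [e0, e1]
        have ihs : pvSeg vals ((k + 1 : Nat) : Int) ((vals.length : Int) - 1) = pvTv (vals.drop (k + 1)) :=
          ih (k + 1) (by omega) hlast
        have hc : ((k : Int) + 1) = ((k + 1 : Nat) : Int) := by push_cast; ring
        rw [hc, ihs, hget, hget1]
        simp [pvTv]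
      · have hkeq : k = vals.length - 1 := by omega
        rw [pvSeg_nonpos vals (k : Int) ((vals.length : Int) - 1) (by omega)]
        have : (vals.drop k).length ≤ 1 := by simp [List.length_drop]; omega
        exact (pvTv_short _ this).symm

-- divide and conquer over [0, len-1] computes pvTv of the whole list
theorem pvTvDC_eq_pvTv (vals : List Int) (n : Int) (hn : n = (vals.length : Int) - 1)
    (h : 1 ≤ vals.length) : pvTvDC vals 0 n = pvTv vals := by
  subst hn
  have h0 : pvTvDC vals 0 ((vals.length : Int) - 1) = pvSeg vals 0 ((vals.length : Int) - 1) :=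
    pvTvDC_eq_pvSeg vals 0 ((vals.length : Int) - 1) (by omega)
  have h1 : pvSeg vals ((0 : Nat) : Int) ((vals.length : Int) - 1) = pvTv (vals.drop 0) :=
    pvSeg_drop vals (vals.length - 0) 0 rfl (by omega)
  simpa using h0.trans (by simpa using h1)

-- A's foldl with running location, plus the final leg back to hive, equals the per-axis
-- total variations of the projected coordinate sequences (Manhattan distance is separable).
theorem pv_key (fs : List (Int × Int)) (loc : Int × Int) (t : Int) (hive : Int × Int) :
    (fs.foldl pvStep (loc, t)).2
      + (|(fs.foldl pvStep (loc, t)).1.1 - hive.1| + |(fs.foldl pvStep (loc, t)).1.2 - hive.2|)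
    = t + pvTv (loc.1 :: (fs.map Prod.fst ++ [hive.1]))
        + pvTv (loc.2 :: (fs.map Prod.snd ++ [hive.2])) := by
  induction fs generalizing loc t with
  | nil => simp [pvTv]; ring
  | cons f fs ih =>
      simp only [List.foldl_cons, List.map_cons, List.cons_append, pvTv]
      rw [ih]
      simp [pvStep]
      ring

theorem length_busyb_eq_alt (flowers : List (Int × Int)) (hive : Int × Int) :
    length_busyb flowers hive = length_busyb_alt flowers hive := by
  have h0 : (PySem.List.pyRange 0 (flowers.length : Int) 1).foldl
      (fun acc j => pvStep acc (PySem.List.pyGetD flowers j ((0, 0) : Int × Int)))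
      ((hive, 0) : (Int × Int) × Int) = flowers.foldl pvStep (hive, 0) := by
    simpa using PySem.List.foldl_pyRange_pyGetD (xs := flowers) (a := 0) (f := pvStep)
      (d := ((0, 0) : Int × Int)) (init := ((hive, 0) : (Int × Int) × Int)) (le_refl 0)
  have h : length_busyb flowers hive
      = (flowers.foldl pvStep (hive, 0)).2
        + (|(flowers.foldl pvStep (hive, 0)).1.1 - hive.1|
          + |(flowers.foldl pvStep (hive, 0)).1.2 - hive.2|) := by
    unfold length_busyb
    show ((PySem.List.pyRange 0 (flowers.length : Int) 1).foldl
        (fun acc j => pvStep acc (PySem.List.pyGetD flowers j ((0, 0) : Int × Int)))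
        ((hive, 0) : (Int × Int) × Int)).2
      + (|((PySem.List.pyRange 0 (flowers.length : Int) 1).foldl
            (fun acc j => pvStep acc (PySem.List.pyGetD flowers j ((0, 0) : Int × Int)))
            ((hive, 0) : (Int × Int) × Int)).1.1 - hive.1|
        + |((PySem.List.pyRange 0 (flowers.length : Int) 1).foldl
            (fun acc j => pvStep acc (PySem.List.pyGetD flowers j ((0, 0) : Int × Int)))
            ((hive, 0) : (Int × Int) × Int)).1.2 - hive.2|) = _
    rw [h0]
  have halt : length_busyb_alt flowers hive
      = pvTv (hive.1 :: (flowers.map Prod.fst ++ [hive.1]))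
        + pvTv (hive.2 :: (flowers.map Prod.snd ++ [hive.2])) := by
    have hrfl : length_busyb_alt flowers hive
        = pvTvDC (hive.1 :: (flowers.map Prod.fst ++ [hive.1])) 0
            (((hive.1 :: (flowers.map Prod.fst ++ [hive.1])).length : Int) - 1)
          + pvTvDC (hive.2 :: (flowers.map Prod.snd ++ [hive.2])) 0
            (((hive.1 :: (flowers.map Prod.fst ++ [hive.1])).length : Int) - 1) := rfl
    rw [hrfl,
      pvTvDC_eq_pvTv (hive.1 :: (flowers.map Prod.fst ++ [hive.1])) _ rfl (by simp),
      pvTvDC_eq_pvTv (hive.2 :: (flowers.map Prod.snd ++ [hive.2])) _ (by simp) (by simp)]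
  rw [h, halt]
  simpa using pv_key flowers hive 0 hive

-- ===== VERDICT (by name: the statement is the Claim_ definition above) =====
theorem length_busyb_spec : Claim_equal_length_busyb := by
  intro flowers hive _
  exact length_busyb_eq_alt flowers hive
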